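-- pv_equiv track=rewrite | github.com/miwaihnt/text_split | api/app/main.py | merge_abbreviation_fragments
-- ===== SOURCE A (Python) =====
-- MERGE_ABBREVIATION_SUFFIXES = (
--     "Mr.",
--     "Mrs.",
--     "Ms.",
--     "Dr.",
--     "Prof.",
--     "Sr.",
--     "Jr.",
-- )
--
-- def merge_abbreviation_fragments(chunks: list[str]) -> list[str]:
--     if not chunks:
--         return []
--
--     merged: list[str] = []
--
--     for chunk in chunks:
--         if merged and _should_merge_with_previous(merged[-1], chunk):
--             merged[-1] = f"{merged[-1].rstrip()} {chunk.lstrip()}".strip()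
--         else:
--             merged.append(chunk)
--
--     return merged
--
-- def _should_merge_with_previous(previous: str, current: str) -> bool:
--     prev_trimmed = previous.rstrip()
--
--     if not any(prev_trimmed.endswith(abbreviation) for abbreviation in MERGE_ABBREVIATION_SUFFIXES):
--         return False
--
--     # If the current fragment starts with closing punctuation or quotes, it is likely a continuation.
--     current_stripped = current.lstrip()
--     if current_stripped and current_stripped[0] in {'"', "”", "'", "’"}:
--         return True
--
--     # Otherwise merge only when we are still inside the same quoted sentence.
--     return True
-- ===== SOURCE B (Python) =====
-- MERGE_ABBREVIATION_SUFFIXES = (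
--     "Mr.",
--     "Mrs.",
--     "Ms.",
--     "Dr.",
--     "Prof.",
--     "Sr.",
--     "Jr.",
-- )
--
--
-- def merge_abbreviation_fragments(chunks: list[str]) -> list[str]:
--     # One pass: partition chunks into groups, extending the current group while the
--     # rstrip of its last non-whitespace fragment ends with an abbreviation; then
--     # render each group (singletons unchanged, others space-joined stripped parts).
--     groups: list[list[str]] = []
--     last_key = ""
--     for chunk in chunks:
--         if groups and last_key.endswith(MERGE_ABBREVIATION_SUFFIXES):
--             groups[-1].append(chunk)
--             if chunk.strip():
--                 last_key = chunk.rstrip()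
--         else:
--             groups.append([chunk])
--             last_key = chunk.rstrip()
--     return [_render_group(g) for g in groups]
--
--
-- def _render_group(group: list[str]) -> str:
--     if len(group) == 1:
--         return group[0]
--     return " ".join(f.strip() for f in group if f.strip())
-- ===== Notes on version B (the rewrite author's own statement) =====
-- stated objective: alternative
-- what changed: Replaces A's destructive rewrite of the accumulator's last element (re-stripping and re-concatenating the growing merged string on every step) by a partition-into-groups pass keyed on the last non-whitespace fragment, followed by a render step that space-joins each multi-fragment group once.
import Mathlib
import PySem

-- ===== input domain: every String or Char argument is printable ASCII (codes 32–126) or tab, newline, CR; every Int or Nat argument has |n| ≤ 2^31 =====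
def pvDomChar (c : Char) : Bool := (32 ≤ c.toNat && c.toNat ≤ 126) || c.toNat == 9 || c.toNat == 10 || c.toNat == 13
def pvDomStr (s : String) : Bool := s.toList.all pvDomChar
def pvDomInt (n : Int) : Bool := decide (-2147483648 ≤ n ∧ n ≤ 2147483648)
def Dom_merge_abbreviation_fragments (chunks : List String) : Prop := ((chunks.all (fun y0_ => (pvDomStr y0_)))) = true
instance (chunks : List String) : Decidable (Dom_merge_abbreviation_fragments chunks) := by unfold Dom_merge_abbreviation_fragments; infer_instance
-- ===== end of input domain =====

-- B replaces A's repeated rewrite of the accumulator's last string by a partition-into-groups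
-- pass keyed on the last non-whitespace fragment, plus a single render (join) per group.

-- ===== PORT A =====
def pvMergeSuffixes : List String := ["Mr.", "Mrs.", "Ms.", "Dr.", "Prof.", "Sr.", "Jr."]

-- transliteration of _should_merge_with_previous (both quote branches kept, as in the Python)
def pvShouldMergeWithPrevious (previous current : String) : Bool :=
  let prevTrimmed := PySem.Str.rstrip previous
  if !(pvMergeSuffixes.any fun abbreviation => PySem.Str.endswith prevTrimmed abbreviation) then
    false
  else
    let currentStripped := PySem.Str.lstrip current
    if PySem.Str.len currentStripped ≠ 0 ∧
        ((PySem.Str.pyGet? currentStripped 0).any fun c => c ∈ ['"', '”', '\'', '’']) then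
      true
    else
      true

-- f-string "{a} {b}" ported as list-level concatenation (exact)
def pvFString (a b : String) : String := String.ofList (a.toList ++ ' ' :: b.toList)

-- the loop body of A: 'if merged and _should_merge…: merged[-1] = …  else: merged.append(chunk)'
def pvStepA (merged : List String) (chunk : String) : List String :=
  match merged.getLast? with
  | some last =>
    if pvShouldMergeWithPrevious last chunk then
      merged.dropLast ++
        [PySem.Str.strip (pvFString (PySem.Str.rstrip last) (PySem.Str.lstrip chunk))]
    else
      merged ++ [chunk]
  | none => merged ++ [chunk]

def merge_abbreviation_fragments (chunks : List String) : List String :=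
  if chunks = [] then []
  else chunks.foldl pvStepA []

-- ===== PORT B =====
-- last_key.endswith(MERGE_ABBREVIATION_SUFFIXES)
def pvEndsWithAbbreviation (s : String) : Bool :=
  pvMergeSuffixes.any fun abbreviation => PySem.Str.endswith s abbreviation

def pvRenderGroup (group : List String) : String :=
  match group with
  | [f] => f
  | _ => PySem.Str.join " " ((group.map PySem.Str.strip).filter (fun f => f ≠ ""))

-- the loop body of B: extend the current group or start a new one, tracking last_key
def pvStepB (st : List (List String) × String) (chunk : String) : List (List String) × String :=
  match st.1.getLast? with
  | some g =>
    if pvEndsWithAbbreviation st.2 then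
      (st.1.dropLast ++ [g ++ [chunk]],
       if PySem.Str.strip chunk ≠ "" then PySem.Str.rstrip chunk else st.2)
    else
      (st.1 ++ [[chunk]], PySem.Str.rstrip chunk)
  | none => (st.1 ++ [[chunk]], PySem.Str.rstrip chunk)

def merge_abbreviation_fragments_alt (chunks : List String) : List String :=
  (chunks.foldl pvStepB ([], "")).1.map pvRenderGroup

-- ===== PRECONDITION & SPEC =====
def Spec_merge_abbreviation_fragments (chunks : List String) (out : List String) : Prop := out = merge_abbreviation_fragments_alt chunks
instance (chunks : List String) (out : List String) : Decidable (Spec_merge_abbreviation_fragments chunks out) := by unfold Spec_merge_abbreviation_fragments; infer_instance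

-- ===== CLAIM (what is proved, stated in full; the proofs are below) =====
def Claim_equal_merge_abbreviation_fragments : Prop := ∀ (chunks : List String), Dom_merge_abbreviation_fragments chunks → Spec_merge_abbreviation_fragments chunks (merge_abbreviation_fragments chunks)

-- ===== LEMMAS AND PROOFS =====

-- char-level view of the abbreviation test
def pvEAList (cs : List Char) : Bool :=
  pvMergeSuffixes.any fun abbreviation => PySem.Chars.endswith cs abbreviation.toList

theorem pvEA_toList (s : String) : pvEndsWithAbbreviation s = pvEAList s.toList := rfl

theorem pvEA_nil : pvEAList [] = false := by decide

-- a suffix of non-whitespace chars reaches past a whitespace boundary iff it is a suffix of the tail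
theorem pv_suffix_ws_boundary (a b t : List Char) (w : Char)
    (hw : PySem.Chars.isspace w = true)
    (ht : ∀ c ∈ t, PySem.Chars.isspace c = false) (htne : t ≠ []) :
    t <:+ (a ++ w :: b) ↔ t <:+ b := by
  constructor
  · rintro ⟨p, hp⟩
    by_cases hpl : a.length + 1 ≤ p.length
    · have ht' : t = (a ++ w :: b).drop p.length := by
        rw [← hp, List.drop_left]
      have h2 : List.drop p.length (a ++ w :: b) = List.drop (p.length - a.length - 1) b := by
        rw [List.drop_append, List.drop_eq_nil_of_le (by omega), List.nil_append,
          show p.length - a.length = (p.length - a.length - 1) + 1 from by omega,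
          List.drop_succ_cons]
        congr 1
      rw [ht', h2]
      exact List.drop_suffix _ _
    · exfalso
      have ht' : t = (a ++ w :: b).drop p.length := by
        rw [← hp, List.drop_left]
      rw [List.drop_append_of_le_length (by omega)] at ht'
      have hmem : w ∈ t := by rw [ht']; simp
      have := ht w hmem
      rw [hw] at this
      exact Bool.noConfusion this
  · intro h
    exact h.trans ((List.suffix_cons w b).trans (List.suffix_append a (w :: b)))

theorem pv_endswith_ws_boundary (a b t : List Char) (w : Char)
    (hw : PySem.Chars.isspace w = true)
    (ht : ∀ c ∈ t, PySem.Chars.isspace c = false) (htne : t ≠ []) :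
    PySem.Chars.endswith (a ++ w :: b) t = PySem.Chars.endswith b t := by
  have h := pv_suffix_ws_boundary a b t w hw ht htne
  cases hb : PySem.Chars.endswith b t
  · cases hab : PySem.Chars.endswith (a ++ w :: b) t
    · rfl
    · exfalso
      have h1 := h.mp ((PySem.Chars.endswith_iff _ _).mp hab)
      rw [(PySem.Chars.endswith_iff _ _).mpr h1] at hb
      exact Bool.noConfusion hb
  · rw [(PySem.Chars.endswith_iff _ _).mpr (h.mpr ((PySem.Chars.endswith_iff _ _).mp hb))]

theorem pv_nows_Mr : ∀ c ∈ "Mr.".toList, PySem.Chars.isspace c = false := by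
  have h : "Mr.".toList = ['M','r','.'] := rfl
  rw [h]
  intro c hc
  fin_cases hc <;> rfl

theorem pv_nows_Mrs : ∀ c ∈ "Mrs.".toList, PySem.Chars.isspace c = false := by
  have h : "Mrs.".toList = ['M','r','s','.'] := rfl
  rw [h]
  intro c hc
  fin_cases hc <;> rfl

theorem pv_nows_Ms : ∀ c ∈ "Ms.".toList, PySem.Chars.isspace c = false := by
  have h : "Ms.".toList = ['M','s','.'] := rfl
  rw [h]
  intro c hc
  fin_cases hc <;> rfl

theorem pv_nows_Dr : ∀ c ∈ "Dr.".toList, PySem.Chars.isspace c = false := by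
  have h : "Dr.".toList = ['D','r','.'] := rfl
  rw [h]
  intro c hc
  fin_cases hc <;> rfl

theorem pv_nows_Prof : ∀ c ∈ "Prof.".toList, PySem.Chars.isspace c = false := by
  have h : "Prof.".toList = ['P','r','o','f','.'] := rfl
  rw [h]
  intro c hc
  fin_cases hc <;> rfl

theorem pv_nows_Sr : ∀ c ∈ "Sr.".toList, PySem.Chars.isspace c = false := by
  have h : "Sr.".toList = ['S','r','.'] := rfl
  rw [h]
  intro c hc
  fin_cases hc <;> rfl

theorem pv_nows_Jr : ∀ c ∈ "Jr.".toList, PySem.Chars.isspace c = false := by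
  have h : "Jr.".toList = ['J','r','.'] := rfl
  rw [h]
  intro c hc
  fin_cases hc <;> rfl

theorem pvEA_ws_boundary (a b : List Char) (w : Char) (hw : PySem.Chars.isspace w = true) :
    pvEAList (a ++ w :: b) = pvEAList b := by
  simp only [pvEAList, pvMergeSuffixes, List.any_cons, List.any_nil]
  rw [pv_endswith_ws_boundary a b "Mr.".toList w hw pv_nows_Mr (by decide),
      pv_endswith_ws_boundary a b "Mrs.".toList w hw pv_nows_Mrs (by decide),
      pv_endswith_ws_boundary a b "Ms.".toList w hw pv_nows_Ms (by decide),
      pv_endswith_ws_boundary a b "Dr.".toList w hw pv_nows_Dr (by decide),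
      pv_endswith_ws_boundary a b "Prof.".toList w hw pv_nows_Prof (by decide),
      pv_endswith_ws_boundary a b "Sr.".toList w hw pv_nows_Sr (by decide),
      pv_endswith_ws_boundary a b "Jr.".toList w hw pv_nows_Jr (by decide)]

theorem pvEA_all_ws_prefix (pre b : List Char) (hpre : ∀ c ∈ pre, PySem.Chars.isspace c = true) :
    pvEAList (pre ++ b) = pvEAList b := by
  rcases List.eq_nil_or_concat pre with rfl | ⟨l, x, rfl⟩
  · simp
  · have hx : PySem.Chars.isspace x = true := hpre x (by simp)
    rw [List.concat_eq_append, List.append_assoc, List.singleton_append,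
      pvEA_ws_boundary l b x hx]

-- rstrip/lstrip/strip toolbox (on List Char)
theorem pv_lstrip_append (u v : List Char) :
    PySem.Chars.lstrip (u ++ v) =
      if PySem.Chars.lstrip u = [] then PySem.Chars.lstrip v else PySem.Chars.lstrip u ++ v := by
  simp [PySem.Chars.lstrip, List.dropWhile_append, List.isEmpty_iff]

theorem pv_rstrip_append (u v : List Char) :
    PySem.Chars.rstrip (u ++ v) =
      if PySem.Chars.rstrip v = [] then PySem.Chars.rstrip u else u ++ PySem.Chars.rstrip v := by
  simp only [PySem.Chars.rstrip, List.reverse_append, List.dropWhile_append, List.isEmpty_iff,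
    List.reverse_eq_nil_iff]
  by_cases h : List.dropWhile PySem.Chars.isspace v.reverse = []
  · simp [h]
  · simp [h, List.reverse_append]

theorem pv_dropWhile_idem (p : Char → Bool) (l : List Char) :
    List.dropWhile p (List.dropWhile p l) = List.dropWhile p l := by
  induction l with
  | nil => simp
  | cons a l ih => by_cases h : p a <;> simp [List.dropWhile_cons, h, ih]

theorem pv_lstrip_idem (s : List Char) :
    PySem.Chars.lstrip (PySem.Chars.lstrip s) = PySem.Chars.lstrip s := by
  simpa [PySem.Chars.lstrip] using pv_dropWhile_idem PySem.Chars.isspace s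

theorem pv_rstrip_idem (s : List Char) :
    PySem.Chars.rstrip (PySem.Chars.rstrip s) = PySem.Chars.rstrip s := by
  simp [PySem.Chars.rstrip, List.reverse_reverse, pv_dropWhile_idem]

theorem pv_lstrip_eq_nil_iff (s : List Char) :
    PySem.Chars.lstrip s = [] ↔ ∀ c ∈ s, PySem.Chars.isspace c = true := by
  simp [PySem.Chars.lstrip, List.dropWhile_eq_nil_iff]

theorem pv_rstrip_eq_nil_iff (s : List Char) :
    PySem.Chars.rstrip s = [] ↔ ∀ c ∈ s, PySem.Chars.isspace c = true := by
  simp [PySem.Chars.rstrip, List.reverse_eq_nil_iff, List.dropWhile_eq_nil_iff]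

theorem pv_rstrip_cons (a : Char) (s : List Char) :
    PySem.Chars.rstrip (a :: s) =
      if PySem.Chars.rstrip s = [] then (if PySem.Chars.isspace a then [] else [a])
      else a :: PySem.Chars.rstrip s := by
  simp only [PySem.Chars.rstrip, List.reverse_cons, List.dropWhile_append, List.isEmpty_iff,
    List.reverse_eq_nil_iff]
  by_cases h : List.dropWhile PySem.Chars.isspace s.reverse = []
  · by_cases ha : PySem.Chars.isspace a <;> simp [h, ha, List.dropWhile_cons]
  · simp [h, List.reverse_append]

theorem pv_strip_comm (s : List Char) :
    PySem.Chars.lstrip (PySem.Chars.rstrip s) = PySem.Chars.rstrip (PySem.Chars.lstrip s) := by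
  induction s with
  | nil => rfl
  | cons a s ih =>
    by_cases ha : PySem.Chars.isspace a
    · have hl : PySem.Chars.lstrip (a :: s) = PySem.Chars.lstrip s := by
        simp [PySem.Chars.lstrip, List.dropWhile_cons, ha]
      rw [pv_rstrip_cons, hl, ← ih]
      by_cases h : PySem.Chars.rstrip s = []
      · simp [h, ha, PySem.Chars.lstrip]
      · simp [h, PySem.Chars.lstrip, List.dropWhile_cons, ha]
    · have hl : PySem.Chars.lstrip (a :: s) = a :: s := by
        simp [PySem.Chars.lstrip, List.dropWhile_cons, ha]
      rw [hl, pv_rstrip_cons]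
      by_cases h : PySem.Chars.rstrip s = []
      · simp [h, ha, PySem.Chars.lstrip, List.dropWhile_cons]
      · simp [h, PySem.Chars.lstrip, List.dropWhile_cons, ha]

theorem pv_strip_def (s : List Char) :
    PySem.Chars.strip s = PySem.Chars.rstrip (PySem.Chars.lstrip s) := rfl

theorem pv_rstrip_strip (s : List Char) :
    PySem.Chars.rstrip (PySem.Chars.strip s) = PySem.Chars.strip s := by
  rw [pv_strip_def]
  exact pv_rstrip_idem _

theorem pv_lstrip_strip (s : List Char) :
    PySem.Chars.lstrip (PySem.Chars.strip s) = PySem.Chars.strip s := by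
  rw [pv_strip_def, pv_strip_comm, pv_lstrip_idem]

theorem pv_strip_eq_nil_iff (s : List Char) :
    PySem.Chars.strip s = [] ↔ PySem.Chars.rstrip s = [] := by
  rw [pv_strip_def, pv_rstrip_eq_nil_iff, pv_rstrip_eq_nil_iff]
  constructor
  · intro h c hc
    rw [← List.takeWhile_append_dropWhile (p := PySem.Chars.isspace) (l := s)] at hc
    rcases List.mem_append.mp hc with h1 | h2
    · exact List.mem_takeWhile_imp h1
    · exact h c h2
  · intro h c hc
    exact h c ((List.dropWhile_sublist _).subset hc)

theorem pvEA_rstrip_eq_strip (s : List Char) :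
    pvEAList (PySem.Chars.rstrip s) = pvEAList (PySem.Chars.strip s) := by
  conv_lhs => rw [← List.takeWhile_append_dropWhile (p := PySem.Chars.isspace)
    (l := PySem.Chars.rstrip s)]
  rw [pvEA_all_ws_prefix _ _ (fun c hc => List.mem_takeWhile_imp hc)]
  have hd : List.dropWhile PySem.Chars.isspace (PySem.Chars.rstrip s) = PySem.Chars.strip s := by
    rw [show List.dropWhile PySem.Chars.isspace (PySem.Chars.rstrip s)
        = PySem.Chars.lstrip (PySem.Chars.rstrip s) from rfl, pv_strip_comm, ← pv_strip_def]
  rw [hd]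

-- the merged[-1] update of A, in closed form
theorem pv_glue (x c : List Char) (hx : PySem.Chars.rstrip x ≠ []) :
    PySem.Chars.strip (PySem.Chars.rstrip x ++ ' ' :: PySem.Chars.lstrip c) =
      if PySem.Chars.strip c = [] then PySem.Chars.strip x
      else PySem.Chars.strip x ++ ' ' :: PySem.Chars.strip c := by
  have hws : PySem.Chars.isspace ' ' = true := by decide
  have hls : PySem.Chars.lstrip (PySem.Chars.rstrip x) ≠ [] := by
    intro h
    have h1 := (pv_lstrip_eq_nil_iff (PySem.Chars.rstrip x)).mp h
    have h2 : PySem.Chars.rstrip (PySem.Chars.rstrip x) = [] := (pv_rstrip_eq_nil_iff _).mpr h1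
    rw [pv_rstrip_idem] at h2
    exact hx h2
  have hsx : PySem.Chars.lstrip (PySem.Chars.rstrip x) = PySem.Chars.strip x := by
    rw [pv_strip_comm, ← pv_strip_def]
  have hc : PySem.Chars.rstrip (PySem.Chars.lstrip c) = PySem.Chars.strip c := (pv_strip_def c).symm
  rw [pv_strip_def, pv_lstrip_append, if_neg hls, hsx, pv_rstrip_append, pv_rstrip_cons, hc]
  by_cases h : PySem.Chars.strip c = []
  · simp [h, hws, pv_rstrip_strip]
  · simp [h]

-- join machinery
def pvJoinL (ps : List (List Char)) : List Char := PySem.Chars.join [' '] ps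

theorem pv_join_concat (ps : List (List Char)) (q : List Char) (h : ps ≠ []) :
    pvJoinL (ps ++ [q]) = pvJoinL ps ++ ' ' :: q := by
  induction ps with
  | nil => exact absurd rfl h
  | cons p ps ih =>
    cases ps with
    | nil =>
      simp [pvJoinL, PySem.Chars.join_cons_cons, PySem.Chars.join_singleton, List.append_assoc]
    | cons p' ps' =>
      have ih' := ih (by simp)
      simp only [pvJoinL, List.cons_append, PySem.Chars.join_cons_cons] at ih' ⊢
      rw [ih']
      simp [List.append_assoc]

theorem pv_join_clean (ps : List (List Char))
    (h : ∀ p ∈ ps, p ≠ [] ∧ PySem.Chars.rstrip p = p ∧ PySem.Chars.lstrip p = p) :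
    PySem.Chars.rstrip (pvJoinL ps) = pvJoinL ps ∧ PySem.Chars.lstrip (pvJoinL ps) = pvJoinL ps ∧
      (ps ≠ [] → pvJoinL ps ≠ []) := by
  induction ps with
  | nil => exact ⟨rfl, rfl, fun h' => absurd rfl h'⟩
  | cons p ps ih =>
    obtain ⟨hp1, hp2, hp3⟩ := h p (by simp)
    have ih' := ih (fun q hq => h q (by simp [hq]))
    cases ps with
    | nil =>
      simp only [pvJoinL, PySem.Chars.join_singleton]
      exact ⟨hp2, hp3, fun _ => hp1⟩
    | cons p' ps' =>
      obtain ⟨ihr, ihl, ihne⟩ := ih'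
      have hrest : pvJoinL (p' :: ps') ≠ [] := ihne (by simp)
      simp only [pvJoinL, PySem.Chars.join_cons_cons] at ihr ihl hrest ⊢
      have hshape : p ++ [' '] ++ PySem.Chars.join [' '] (p' :: ps')
          = p ++ ' ' :: PySem.Chars.join [' '] (p' :: ps') := by simp
      rw [hshape]
      refine ⟨?_, ?_, ?_⟩
      · rw [pv_rstrip_append, pv_rstrip_cons, ihr, if_neg hrest, if_neg (by simp)]
      · rw [pv_lstrip_append, if_neg (by rw [hp3]; exact hp1), hp3]
      · intro _
        simp [hp1]

-- parts of a group, at char level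
def pvCharParts (g : List String) : List (List Char) :=
  (g.map (fun s => PySem.Chars.strip s.toList)).filter (fun l => l ≠ [])

theorem pv_str_empty_iff (s : String) : s = "" ↔ s.toList = [] := by
  constructor
  · intro h; subst h; rfl
  · intro h
    apply String.toList_inj.mp
    rw [h]
    rfl

theorem pv_parts_toList (g : List String) :
    ((g.map PySem.Str.strip).filter (fun f => f ≠ "")).map String.toList = pvCharParts g := by
  induction g with
  | nil => rfl
  | cons s g ih =>
    simp only [pvCharParts, List.map_cons, List.filter_cons] at *
    by_cases h : PySem.Str.strip s = ""
    · have h' : PySem.Chars.strip s.toList = [] := by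
        have := (pv_str_empty_iff _).mp h
        simpa using this
      simp only [h', ih]
      simp [h, h']
      simpa using ih
    · have h' : PySem.Chars.strip s.toList ≠ [] := by
        intro hc
        apply h
        rw [pv_str_empty_iff]
        simpa using hc
      simp [h, h']
      simpa using ih

theorem pv_charParts_mem (g : List String) (p : List Char) (hp : p ∈ pvCharParts g) :
    p ≠ [] ∧ PySem.Chars.rstrip p = p ∧ PySem.Chars.lstrip p = p := by
  simp only [pvCharParts, List.mem_filter, List.mem_map] at hp
  obtain ⟨⟨s, _, rfl⟩, hne⟩ := hp
  exact ⟨by simpa using hne, pv_rstrip_strip _, pv_lstrip_strip _⟩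

theorem pv_charParts_concat (g : List String) (c : String) :
    pvCharParts (g ++ [c]) = pvCharParts g ++
      (if PySem.Chars.strip c.toList = [] then [] else [PySem.Chars.strip c.toList]) := by
  simp only [pvCharParts, List.map_append, List.filter_append, List.map_cons, List.map_nil,
    List.filter_cons, List.filter_nil]
  by_cases h : PySem.Chars.strip c.toList = [] <;> simp [h]

theorem pv_render_single (f : String) : pvRenderGroup [f] = f := rfl

theorem pv_render_big (r s : String) (g : List String) :
    (pvRenderGroup (r :: s :: g)).toList = pvJoinL (pvCharParts (r :: s :: g)) := by
  have h1 : pvRenderGroup (r :: s :: g)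
      = PySem.Str.join " " (((r :: s :: g).map PySem.Str.strip).filter (fun f => f ≠ "")) := rfl
  have h2 : (PySem.Str.join " " (((r :: s :: g).map PySem.Str.strip).filter (fun f => f ≠ ""))).toList
      = PySem.Chars.join " ".toList
          ((((r :: s :: g).map PySem.Str.strip).filter (fun f => f ≠ "")).map String.toList) := by
    simp [PySem.Str.join]
  rw [h1, h2, pv_parts_toList]
  rfl

theorem pv_newL_rstrip (X c : List Char) (hXr : PySem.Chars.rstrip X = X) :
    PySem.Chars.rstrip (if PySem.Chars.strip c = [] then X else X ++ ' ' :: PySem.Chars.strip c)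
      = (if PySem.Chars.strip c = [] then X else X ++ ' ' :: PySem.Chars.strip c) := by
  by_cases h : PySem.Chars.strip c = []
  · simp [h, hXr]
  · rw [if_neg h, pv_rstrip_append, pv_rstrip_cons, pv_rstrip_strip, if_neg h,
      if_neg (by simp)]

set_option maxRecDepth 8192 in
theorem pv_newL_EA (X c : List Char) :
    pvEAList (X ++ ' ' :: PySem.Chars.strip c) = pvEAList (PySem.Chars.rstrip c) := by
  rw [pvEA_ws_boundary X _ ' ' (by decide)]
  exact (pvEA_rstrip_eq_strip c).symm

theorem pv_shouldMerge_eq (p c : String) :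
    pvShouldMergeWithPrevious p c = pvEndsWithAbbreviation (PySem.Str.rstrip p) := by
  simp [pvShouldMergeWithPrevious, pvEndsWithAbbreviation, ite_self]
  cases h : (pvMergeSuffixes.any fun abbreviation =>
      PySem.Chars.endswith (PySem.Chars.rstrip p.toList) abbreviation.toList)
  · rw [Bool.not_false, decide_eq_true_eq]
    intro x hx
    exact Bool.eq_false_iff.mpr (List.any_eq_false.mp h x hx)
  · rw [Bool.not_true, decide_eq_false_iff_not]
    intro hall
    obtain ⟨x, hx1, hx2⟩ := List.any_eq_true.mp h
    rw [hall x hx1] at hx2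
    exact Bool.noConfusion hx2

-- the central step lemma at the string level
set_option maxRecDepth 8192 in
theorem pv_core (g : List String) (chunk : String)
    (hEA : pvEndsWithAbbreviation (PySem.Str.rstrip (pvRenderGroup g)) = true) :
    PySem.Str.strip (pvFString (PySem.Str.rstrip (pvRenderGroup g)) (PySem.Str.lstrip chunk))
      = pvRenderGroup (g ++ [chunk]) ∧
    pvEndsWithAbbreviation (PySem.Str.rstrip (pvRenderGroup (g ++ [chunk])))
      = pvEndsWithAbbreviation
          (if PySem.Str.strip chunk ≠ "" then PySem.Str.rstrip chunk
           else PySem.Str.rstrip (pvRenderGroup g)) := by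
  have hchiff : (PySem.Str.strip chunk = "") ↔ (PySem.Chars.strip chunk.toList = []) := by
    rw [pv_str_empty_iff]; simp
  rcases g with _ | ⟨r, g⟩
  · exact absurd hEA (by decide)
  rcases g with _ | ⟨s, g'⟩
  · -- singleton group [r]
    have hrend : pvRenderGroup [r] = r := rfl
    rw [hrend] at hEA ⊢
    have hEA' : pvEAList (PySem.Chars.rstrip r.toList) = true := by
      rw [pvEA_toList] at hEA
      simpa using hEA
    have hRne : PySem.Chars.rstrip r.toList ≠ [] := by
      intro h
      rw [h, pvEA_nil] at hEA'
      exact Bool.false_ne_true hEA'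
    have hSne : PySem.Chars.strip r.toList ≠ [] := fun h => hRne ((pv_strip_eq_nil_iff _).mp h)
    have hglue := pv_glue r.toList chunk.toList hRne
    have hrtl : (pvRenderGroup ([r] ++ [chunk])).toList =
        (if PySem.Chars.strip chunk.toList = [] then PySem.Chars.strip r.toList
         else PySem.Chars.strip r.toList ++ ' ' :: PySem.Chars.strip chunk.toList) := by
      rw [show ([r] ++ [chunk]) = [r, chunk] from rfl, pv_render_big]
      have hcp : pvCharParts [r, chunk] =
          PySem.Chars.strip r.toList ::
            (if PySem.Chars.strip chunk.toList = [] then []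
             else [PySem.Chars.strip chunk.toList]) := by
        simp only [pvCharParts, List.map_cons, List.map_nil, List.filter_cons, List.filter_nil]
        by_cases h : PySem.Chars.strip chunk.toList = [] <;> simp [h, hSne]
      rw [hcp]
      by_cases h : PySem.Chars.strip chunk.toList = []
      · simp [h, pvJoinL, PySem.Chars.join_singleton]
      · simp [h, pvJoinL, PySem.Chars.join_cons_cons, PySem.Chars.join_singleton,
          List.append_assoc]
    constructor
    · rw [← String.toList_inj]
      have hlhs : (PySem.Str.strip (pvFString (PySem.Str.rstrip r) (PySem.Str.lstrip chunk))).toList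
          = PySem.Chars.strip
              (PySem.Chars.rstrip r.toList ++ ' ' :: PySem.Chars.lstrip chunk.toList) := by
        simp [pvFString]
      rw [hlhs, hglue, hrtl]
    · rw [pvEA_toList, pvEA_toList]
      have h1 : (PySem.Str.rstrip (pvRenderGroup ([r] ++ [chunk]))).toList
          = PySem.Chars.rstrip ((pvRenderGroup ([r] ++ [chunk])).toList) := by simp
      rw [h1, hrtl, pv_newL_rstrip _ _ (pv_rstrip_strip _)]
      by_cases h : PySem.Chars.strip chunk.toList = []
      · have hch : PySem.Str.strip chunk = "" := hchiff.mpr h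
        rw [if_pos h, if_neg (fun hcc => hcc hch)]
        have h2 : (PySem.Str.rstrip r).toList = PySem.Chars.rstrip r.toList := by simp
        rw [h2]
        exact (pvEA_rstrip_eq_strip r.toList).symm
      · have hch : PySem.Str.strip chunk ≠ "" := fun hh => h (hchiff.mp hh)
        rw [if_neg h, if_pos hch, pv_newL_EA]
        have h2 : (PySem.Str.rstrip chunk).toList = PySem.Chars.rstrip chunk.toList := by simp
        rw [h2]
  · -- group with at least two fragments
    have hrend : (pvRenderGroup (r :: s :: g')).toList = pvJoinL (pvCharParts (r :: s :: g')) :=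
      pv_render_big r s g'
    have hclean := pv_join_clean (pvCharParts (r :: s :: g'))
      (fun p hp => pv_charParts_mem _ p hp)
    obtain ⟨hcr, hcl, hcn⟩ := hclean
    have hEA' : pvEAList (pvJoinL (pvCharParts (r :: s :: g'))) = true := by
      rw [pvEA_toList] at hEA
      have h1 : (PySem.Str.rstrip (pvRenderGroup (r :: s :: g'))).toList
          = PySem.Chars.rstrip ((pvRenderGroup (r :: s :: g')).toList) := by simp
      rw [h1, hrend, hcr] at hEA
      exact hEA
    have hXne : pvJoinL (pvCharParts (r :: s :: g')) ≠ [] := by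
      intro h
      rw [h, pvEA_nil] at hEA'
      exact Bool.false_ne_true hEA'
    have hcpne : pvCharParts (r :: s :: g') ≠ [] := by
      intro h
      apply hXne
      rw [h]
      rfl
    have hsX : PySem.Chars.strip (pvJoinL (pvCharParts (r :: s :: g')))
        = pvJoinL (pvCharParts (r :: s :: g')) := by
      rw [pv_strip_def, hcl, hcr]
    have hglue := pv_glue (pvJoinL (pvCharParts (r :: s :: g'))) chunk.toList
      (by rw [hcr]; exact hXne)
    rw [hcr, hsX] at hglue
    have hrtl : (pvRenderGroup ((r :: s :: g') ++ [chunk])).toList =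
        (if PySem.Chars.strip chunk.toList = [] then pvJoinL (pvCharParts (r :: s :: g'))
         else pvJoinL (pvCharParts (r :: s :: g')) ++ ' ' :: PySem.Chars.strip chunk.toList) := by
      rw [show (r :: s :: g') ++ [chunk] = r :: s :: (g' ++ [chunk]) from rfl, pv_render_big]
      have hparts : pvCharParts (r :: s :: (g' ++ [chunk]))
          = pvCharParts (r :: s :: g') ++
            (if PySem.Chars.strip chunk.toList = [] then []
             else [PySem.Chars.strip chunk.toList]) := by
        rw [show r :: s :: (g' ++ [chunk]) = (r :: s :: g') ++ [chunk] from rfl,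
          pv_charParts_concat]
      rw [hparts]
      by_cases h : PySem.Chars.strip chunk.toList = []
      · simp [h]
      · rw [if_neg h, if_neg h, pv_join_concat _ _ hcpne]
    constructor
    · rw [← String.toList_inj]
      have hlhs : (PySem.Str.strip (pvFString (PySem.Str.rstrip (pvRenderGroup (r :: s :: g')))
          (PySem.Str.lstrip chunk))).toList
          = PySem.Chars.strip (PySem.Chars.rstrip ((pvRenderGroup (r :: s :: g')).toList)
              ++ ' ' :: PySem.Chars.lstrip chunk.toList) := by
        simp [pvFString]
      rw [hlhs, hrend, hcr, hglue, hrtl]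
    · rw [pvEA_toList, pvEA_toList]
      have h1 : (PySem.Str.rstrip (pvRenderGroup ((r :: s :: g') ++ [chunk]))).toList
          = PySem.Chars.rstrip ((pvRenderGroup ((r :: s :: g') ++ [chunk])).toList) := by simp
      rw [h1, hrtl, pv_newL_rstrip _ _ hcr]
      by_cases h : PySem.Chars.strip chunk.toList = []
      · have hch : PySem.Str.strip chunk = "" := hchiff.mpr h
        rw [if_pos h, if_neg (fun hcc => hcc hch)]
        have h2 : (PySem.Str.rstrip (pvRenderGroup (r :: s :: g'))).toList
            = PySem.Chars.rstrip ((pvRenderGroup (r :: s :: g')).toList) := by simp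
        rw [h2, hrend, hcr]
      · have hch : PySem.Str.strip chunk ≠ "" := fun hh => h (hchiff.mp hh)
        rw [if_neg h, if_pos hch, pv_newL_EA]
        have h2 : (PySem.Str.rstrip chunk).toList = PySem.Chars.rstrip chunk.toList := by simp
        rw [h2]

theorem pv_dropLast_map {f : List String → String} (l : List (List String)) :
    l.dropLast.map f = (l.map f).dropLast := by
  induction l with
  | nil => rfl
  | cons a l ih =>
    cases l with
    | nil => rfl
    | cons b l' => simp [List.dropLast_cons₂, ih]

-- the invariant tying A's accumulator to B's state
def pvInv (merged : List String) (groups : List (List String)) (key : String) : Prop :=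
  merged = groups.map pvRenderGroup ∧
  ∀ g, groups.getLast? = some g →
    pvEndsWithAbbreviation (PySem.Str.rstrip (pvRenderGroup g)) = pvEndsWithAbbreviation key

theorem pv_step (merged : List String) (groups : List (List String)) (key : String)
    (chunk : String) (h : pvInv merged groups key) :
    pvInv (pvStepA merged chunk) (pvStepB (groups, key) chunk).1
      (pvStepB (groups, key) chunk).2 := by
  obtain ⟨hm, hk⟩ := h
  have hml : merged.getLast? = (groups.getLast?).map pvRenderGroup := by
    rw [hm, List.getLast?_map]
  unfold pvStepA pvStepB
  cases hg : groups.getLast? with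
  | none =>
    have hgr : groups = [] := List.getLast?_eq_none_iff.mp hg
    subst hgr
    simp only [List.map_nil] at hm
    subst hm
    simp only [List.getLast?_nil]
    refine ⟨rfl, ?_⟩
    intro g' hg'
    have hgc : [chunk] = g' := by simpa using hg'
    subst hgc
    rfl
  | some g =>
    rw [hg] at hml
    have hsm : pvShouldMergeWithPrevious (pvRenderGroup g) chunk = pvEndsWithAbbreviation key := by
      rw [pv_shouldMerge_eq, hk g hg]
    cases hcond : pvEndsWithAbbreviation key with
    | false =>
      simp only [hml, hg, Option.map_some, hcond, hsm, Bool.false_eq_true, if_false]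
      refine ⟨?_, ?_⟩
      · rw [hm, List.map_append]
        simp [pv_render_single]
      · intro g' hg'
        simp only [List.getLast?_concat, Option.some.injEq] at hg'
        subst hg'
        rw [pv_render_single]
    | true =>
      obtain ⟨hcore1, hcore2⟩ := pv_core g chunk (by rw [hk g hg]; exact hcond)
      simp only [hml, hg, Option.map_some, hcond, hsm, if_true]
      refine ⟨?_, ?_⟩
      · rw [hm, hcore1, List.map_append, pv_dropLast_map]
        rfl
      · intro g' hg'
        simp only [List.getLast?_concat, Option.some.injEq] at hg'
        subst hg'
        rw [hcore2]
        by_cases hch : PySem.Str.strip chunk ≠ ""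
        · rw [if_pos hch, if_pos hch]
        · rw [if_neg hch, if_neg hch, hk g hg]

theorem pv_fold (chunks : List String) :
    ∀ (merged : List String) (groups : List (List String)) (key : String),
      pvInv merged groups key →
      pvInv (chunks.foldl pvStepA merged) (chunks.foldl pvStepB (groups, key)).1
        (chunks.foldl pvStepB (groups, key)).2 := by
  induction chunks with
  | nil => intro m g k h; simpa using h
  | cons c cs ih =>
    intro m g k h
    simpa [List.foldl_cons] using ih _ _ _ (pv_step m g k c h)

-- ===== VERDICT (by name: the statement is the Claim_ definition above) =====
theorem merge_abbreviation_fragments_spec : Claim_equal_merge_abbreviation_fragments := by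
  intro chunks _
  unfold Spec_merge_abbreviation_fragments merge_abbreviation_fragments
    merge_abbreviation_fragments_alt
  by_cases hc : chunks = []
  · subst hc; rfl
  · simp only [hc, if_false]
    exact (pv_fold chunks [] [] "" ⟨rfl, by intro g hg; simp at hg⟩).1
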